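-- pv_equiv track=rewrite | github.com/Park-Giryun/Algorithm-Programmers | Level 1/4주차.py | solution
-- ===== SOURCE A (Python) =====
-- def solution(table, languages, preference):
--     answer = []
--     for data in table:
--         num = 0
--         for idx, value in enumerate(data.split(" ")):
--             for pair in zip(languages, preference):
--                 if value == pair[0]:
--                     num += (6 - idx) * pair[1]
--         answer.append((num, data.split(" ")[0]))
--     return sorted(answer, key=lambda x: (-x[0], x[1]))[0][1]
-- ===== SOURCE B (Python) =====
-- def solution(table, languages, preference):
--     # single running-best pass instead of building a list and sorting it
--     best_score = None
--     best_name = None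
--     for data in table:
--         tokens = data.split(" ")
--         score = sum((6 - idx) * pref
--                     for idx, value in enumerate(tokens)
--                     for lang, pref in zip(languages, preference)
--                     if value == lang)
--         name = tokens[0]
--         if best_score is None or score > best_score or (score == best_score and name < best_name):
--             best_score, best_name = score, name
--     return best_name
-- ===== Notes on version B (the rewrite author's own statement) =====
-- stated objective: simpler
-- what changed: Replaces collecting (score, name) pairs and sorting them by (-score, name) with a single running-best selection scan (greater score, or equal score and lexicographically smaller name, replaces the best), and expresses the per-row score as one sum comprehension instead of nested accumulating loops; Pre_ excludes the empty table, on which A raises IndexError.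
import Mathlib
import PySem

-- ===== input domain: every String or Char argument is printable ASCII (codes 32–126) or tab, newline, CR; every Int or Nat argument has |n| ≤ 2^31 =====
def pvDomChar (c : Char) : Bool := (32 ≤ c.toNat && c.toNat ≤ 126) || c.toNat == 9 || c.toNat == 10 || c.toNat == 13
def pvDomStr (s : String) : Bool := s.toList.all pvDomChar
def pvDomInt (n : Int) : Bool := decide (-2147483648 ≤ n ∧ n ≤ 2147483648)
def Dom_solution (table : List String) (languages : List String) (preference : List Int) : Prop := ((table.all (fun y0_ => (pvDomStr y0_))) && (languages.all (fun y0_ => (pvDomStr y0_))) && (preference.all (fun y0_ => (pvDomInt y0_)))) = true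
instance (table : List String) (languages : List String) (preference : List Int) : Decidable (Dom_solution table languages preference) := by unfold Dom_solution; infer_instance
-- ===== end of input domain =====

-- B replaces A's collect-then-sort by a single running-best pass (and a sum comprehension for the row score); equal return values on every nonempty table.


-- ===== PORT A =====
-- num accumulated over enumerate(data.split(" ")) and zip(languages, preference)
def aRowNum (languages : List String) (preference : List Int) (tokens : List String) : Int :=
  (PySem.List.enumerate tokens).foldl
    (fun num iv => (languages.zip preference).foldl
      (fun num pair => if iv.2 == pair.1 then num + (6 - iv.1) * pair.2 else num) num) 0

def solution (table : List String) (languages : List String) (preference : List Int) : String :=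
  let answer := table.foldl (fun acc data =>
    -- data.split(" "): the separator is the nonempty literal " ", so split? is always some
    let tokens := (PySem.Str.split? data " ").getD []
    acc ++ [(aRowNum languages preference tokens, (PySem.List.pyGet? tokens 0).getD "")]) []
  -- sorted(answer, key=lambda x: (-x[0], x[1]))[0][1]; [0] raises IndexError iff table = [] (excluded by Pre_)
  ((PySem.List.pyGet? (PySem.List.sorted2 answer (fun x => -x.1) (fun x => x.2)) 0).getD (0, "")).2

-- ===== PORT B =====
-- score = sum((6 - idx) * pref for idx, value in enumerate(tokens) for lang, pref in zip(languages, preference) if value == lang)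
def bRowScore (languages : List String) (preference : List Int) (tokens : List String) : Int :=
  ((PySem.List.enumerate tokens).flatMap (fun iv =>
    ((languages.zip preference).filter (fun lp => iv.2 == lp.1)).map (fun lp => (6 - iv.1) * lp.2))).sum

def solution_alt (table : List String) (languages : List String) (preference : List Int) : String :=
  let best := table.foldl (fun best data =>
    let tokens := (PySem.Str.split? data " ").getD []
    let score := bRowScore languages preference tokens
    let name := (PySem.List.pyGet? tokens 0).getD ""
    match best with
    | none => some (score, name)
    | some b => if score > b.1 ∨ (score = b.1 ∧ name < b.2) then some (score, name) else some b) none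
  -- best_name is still None iff table = [] (excluded by Pre_)
  (best.map (fun b => b.2)).getD ""

-- ===== PRECONDITION & SPEC =====
-- A raises IndexError on the empty table (sorted(answer)[0]); no input on which A returns is excluded.
def Pre_solution (table : List String) (languages : List String) (preference : List Int) : Prop := table ≠ []
instance (table : List String) (languages : List String) (preference : List Int) : Decidable (Pre_solution table languages preference) := by unfold Pre_solution; infer_instance
def pvWitness_solution : List String × List String × List Int := (["py 3 2", "c 1"], ["py", "c"], [5, 2])

def Spec_solution (table : List String) (languages : List String) (preference : List Int) (out : String) : Prop := out = solution_alt table languages preference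
instance (table : List String) (languages : List String) (preference : List Int) (out : String) : Decidable (Spec_solution table languages preference out) := by unfold Spec_solution; infer_instance

-- ===== CLAIM (what is proved, stated in full; the proofs are below) =====
def Claim_equal_solution : Prop := ∀ (table : List String) (languages : List String) (preference : List Int), Dom_solution table languages preference → Pre_solution table languages preference → Spec_solution table languages preference (solution table languages preference)

-- ===== LEMMAS AND PROOFS =====

-- the (score, first-token) pair A computes for one row
def rowA (languages : List String) (preference : List Int) (data : String) : Int × String :=
  (aRowNum languages preference ((PySem.Str.split? data " ").getD []),
   (PySem.List.pyGet? ((PySem.Str.split? data " ").getD []) 0).getD "")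

-- the (score, first-token) pair B computes for one row
def rowB (languages : List String) (preference : List Int) (data : String) : Int × String :=
  (bRowScore languages preference ((PySem.Str.split? data " ").getD []),
   (PySem.List.pyGet? ((PySem.Str.split? data " ").getD []) 0).getD "")

lemma sum_flatMap_int {α : Type} (l : List α) (f : α → List Int) :
    (l.flatMap f).sum = (l.map (fun x => (f x).sum)).sum := by
  induction l with
  | nil => simp
  | cons x t ih => simp [ih]

lemma score_eq (languages : List String) (preference : List Int) (tokens : List String) :
    bRowScore languages preference tokens = aRowNum languages preference tokens := by
  unfold bRowScore aRowNum
  rw [sum_flatMap_int]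
  symm
  have hinner : ∀ (num : Int) (iv : Int × String),
      (languages.zip preference).foldl
        (fun num pair => if iv.2 == pair.1 then num + (6 - iv.1) * pair.2 else num) num
      = num + ((((languages.zip preference).filter (fun lp => iv.2 == lp.1)).map
          (fun lp => (6 - iv.1) * lp.2)).sum) := by
    intro num iv
    rw [PySem.List.foldl_if_eq_foldl_filter (fun pair : String × Int => iv.2 == pair.1)
        (fun num pair => num + (6 - iv.1) * pair.2) (languages.zip preference) num]
    exact PySem.List.foldl_add _ (fun pair : String × Int => (6 - iv.1) * pair.2) num
  have houter := PySem.List.foldl_congr_mem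
    (l := PySem.List.enumerate tokens)
    (f := fun num iv => (languages.zip preference).foldl
        (fun num pair => if iv.2 == pair.1 then num + (6 - iv.1) * pair.2 else num) num)
    (g := fun num iv => num + ((((languages.zip preference).filter (fun lp => iv.2 == lp.1)).map
        (fun lp => (6 - iv.1) * lp.2)).sum))
    (init := 0)
    (fun num iv _ => hinner num iv)
  rw [houter, PySem.List.foldl_add, zero_add]

lemma rowB_eq (languages : List String) (preference : List Int) (data : String) :
    rowB languages preference data = rowA languages preference data := by
  unfold rowA rowB
  rw [score_eq]

lemma head?_insertBy {α : Type} (p : α → α → Bool) (x h : α) (t : List α) :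
    (PySem.List.insertBy p x (h :: t)).head? = some (if p x h then x else h) := by
  simp only [PySem.List.insertBy]
  split_ifs <;> simp

lemma foldl_insertBy_head {α : Type} (p : α → α → Bool) :
    ∀ (t acc : List α) (b : α), acc.head? = some b →
      (t.foldl (fun acc x => PySem.List.insertBy p x acc) acc).head?
        = some (t.foldl (fun b x => if p x b then x else b) b) := by
  intro t
  induction t with
  | nil => intro acc b h; simpa using h
  | cons x t ih =>
    intro acc b h
    cases acc with
    | nil => simp at h
    | cons a0 acc0 =>
      simp only [List.head?_cons, Option.some.injEq] at h
      subst h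
      simp only [List.foldl_cons]
      exact ih _ _ (head?_insertBy p x a0 acc0)

lemma sorted2_head (l : List (Int × String)) (a : Int × String) :
    (PySem.List.sorted2 (a :: l) (fun x => -x.1) (fun x => x.2)).head?
      = some (l.foldl (fun b x =>
          if (decide (-x.1 < -b.1) || (!decide (-b.1 < -x.1) && decide (x.2 < b.2))) then x else b) a) := by
  show ((a :: l).foldl (fun acc x => PySem.List.insertBy _ x acc) []).head? = _
  simp only [List.foldl_cons]
  exact foldl_insertBy_head _ l (PySem.List.insertBy _ a []) a (by simp [PySem.List.insertBy])

lemma cond_eq (x b : Int × String) :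
    (if (decide (-x.1 < -b.1) || (!decide (-b.1 < -x.1) && decide (x.2 < b.2))) then x else b)
      = (if x.1 > b.1 ∨ (x.1 = b.1 ∧ x.2 < b.2) then x else b) := by
  by_cases h1 : b.1 < x.1
  · simp [h1, show -x.1 < -b.1 by omega]
  · by_cases h2 : x.1 = b.1
    · by_cases h3 : x.2 < b.2 <;> simp [h2, h3]
    · have hx : x.1 < b.1 := by omega
      simp [show ¬ (-x.1 < -b.1) by omega, show -b.1 < -x.1 by omega, h1, h2]

lemma pyGet?_zero {α : Type} (l : List α) : PySem.List.pyGet? l 0 = l.head? := by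
  cases l <;> simp [PySem.List.pyGet?, PySem.List.pyIdx?]

-- B's option-valued loop, once the accumulator is some b, is the plain running-best fold
lemma opt_fold (languages : List String) (preference : List Int) :
    ∀ (l : List String) (b : Int × String),
      l.foldl (fun best data =>
        match best with
        | none => some (rowB languages preference data)
        | some b => if (rowB languages preference data).1 > b.1 ∨
              ((rowB languages preference data).1 = b.1 ∧ (rowB languages preference data).2 < b.2)
            then some (rowB languages preference data) else some b) (some b)
      = some (l.foldl (fun b data =>
          if (rowB languages preference data).1 > b.1 ∨
              ((rowB languages preference data).1 = b.1 ∧ (rowB languages preference data).2 < b.2)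
            then rowB languages preference data else b) b) := by
  intro l
  induction l with
  | nil => intro b; rfl
  | cons d t ih =>
    intro b
    simp only [List.foldl_cons]
    split <;> exact ih _

-- ===== VERDICT (by name: the statement is the Claim_ definition above) =====
theorem solution_spec : Claim_equal_solution := by
  intro table languages preference _ hpre
  unfold Spec_solution
  cases table with
  | nil => exact absurd rfl hpre
  | cons d ds =>
    unfold solution solution_alt
    show ((PySem.List.pyGet? (PySem.List.sorted2
            ((d :: ds).foldl (fun acc data => acc ++ [rowA languages preference data]) [])
            (fun x => -x.1) (fun x => x.2)) 0).getD (0, "")).2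
      = ((ds.foldl (fun best data =>
            match best with
            | none => some (rowB languages preference data)
            | some b => if (rowB languages preference data).1 > b.1 ∨
                  ((rowB languages preference data).1 = b.1 ∧ (rowB languages preference data).2 < b.2)
                then some (rowB languages preference data) else some b)
            (some (rowB languages preference d))).map (fun b => b.2)).getD ""
    rw [PySem.List.foldl_append_singleton_eq_map, List.nil_append, List.map_cons,
        pyGet?_zero, sorted2_head, opt_fold]
    simp only [Option.getD_some, Option.map_some, rowB_eq]
    congr 1
    rw [List.foldl_map]
    exact PySem.List.foldl_congr_mem _ _ _ _
      (fun b data _ => cond_eq (rowA languages preference data) b)
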